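-- pv_equiv track=rewrite | github.com/lappsgrid-services/GeneTagDatasource | src/main/python/create_data.py | adjust_offset
-- ===== SOURCE A (Python) =====
-- def adjust_offset(sentence, offset):
--     adjusted = 0
--     if offset == 0:
--         return adjusted
--     for i, c in enumerate(sentence):
--         adjusted += 1
--         if c != ' ':
--             offset += -1
--         if offset == 0:
--             if sentence[i+1] == ' ':
--                 adjusted += 1
--             return adjusted
-- ===== SOURCE B (Python) =====
-- def adjust_offset(sentence, offset):
--     if offset == 0:
--         return 0
--     positions = [i for i, c in enumerate(sentence) if c != ' ']
--     if offset < 0 or offset > len(positions):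
--         return None
--     i = positions[offset - 1]
--     adjusted = i + 1
--     if sentence[i + 1] == ' ':
--         adjusted += 1
--     return adjusted
-- ===== Notes on version B (the rewrite author's own statement) =====
-- stated objective: simpler
-- what changed: Replaces the stateful scan that counts consumed characters and decrements the offset with a direct computation: build the list of non-space character indices once, index it at offset-1, and derive the answer from that position.
-- outside the precondition, e.g. on adjust_offset('ab', 5): A returns None, B returns None; on adjust_offset('ab', 2): A raises IndexError, B raises IndexError
import Mathlib
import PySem

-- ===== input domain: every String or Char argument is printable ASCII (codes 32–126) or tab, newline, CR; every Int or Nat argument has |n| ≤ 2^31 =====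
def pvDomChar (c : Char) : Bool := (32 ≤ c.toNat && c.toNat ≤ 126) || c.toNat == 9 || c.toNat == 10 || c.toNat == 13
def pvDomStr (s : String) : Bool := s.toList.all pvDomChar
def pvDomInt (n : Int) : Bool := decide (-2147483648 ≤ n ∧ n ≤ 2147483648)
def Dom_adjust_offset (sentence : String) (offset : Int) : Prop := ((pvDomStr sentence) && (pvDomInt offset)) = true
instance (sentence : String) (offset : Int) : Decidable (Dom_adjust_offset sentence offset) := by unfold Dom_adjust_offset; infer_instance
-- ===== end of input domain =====

-- B replaces A's stateful scan (counting consumed chars while decrementing offset) with a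
-- direct computation over the list of non-space character indices; objective: simpler.


-- ===== PORT A =====
-- the for-loop of A; `rest` is the part of the sentence not yet scanned, `i` its first index.
-- On the paths where Python A returns None (loop falls off) or raises IndexError
-- (sentence[i+1] out of range) the port returns 0; those inputs are outside Pre_.
def adjLoopA (full : List Char) (rest : List Char) (i : Int) (adjusted : Int) (offset : Int) : Int :=
  match rest with
  | [] => 0
  | c :: r =>
    let adjusted := adjusted + 1
    let offset := if c ≠ ' ' then offset + (-1) else offset
    if offset = 0 then
      match PySem.List.pyGet? full (i + 1) with
      | some ch => if ch = ' ' then adjusted + 1 else adjusted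
      | none => 0
    else adjLoopA full r (i + 1) adjusted offset

def adjust_offset (sentence : String) (offset : Int) : Int :=
  let adjusted : Int := 0
  if offset = 0 then adjusted
  else adjLoopA sentence.toList sentence.toList 0 adjusted offset

-- ===== PORT B =====
-- positions = [i for i, c in enumerate(sentence) if c != ' ']
def adjust_offset_alt (sentence : String) (offset : Int) : Int :=
  if offset = 0 then 0
  else
    let positions := ((PySem.List.enumerate sentence.toList).filter (fun p => p.2 ≠ ' ')).map Prod.fst
    if offset < 0 ∨ offset > (positions.length : Int) then 0   -- Python B returns None here (outside Pre_)
    else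
      match PySem.List.pyGet? positions (offset - 1) with
      | none => 0
      | some i =>
        let adjusted := i + 1
        match PySem.List.pyGet? sentence.toList (i + 1) with
        | some ch => if ch = ' ' then adjusted + 1 else adjusted
        | none => 0   -- Python B raises IndexError here (outside Pre_)

-- ===== PRECONDITION & SPEC =====
-- Pre_ excludes exactly the inputs on which A does not return an int: offsets that are negative
-- or exceed the number of non-space characters (A falls off its loop and returns None), and the
-- case where the selected position is the last character (sentence[i+1] raises IndexError).
def Pre_adjust_offset (sentence : String) (offset : Int) : Prop :=
  offset = 0 ∨
    (1 ≤ offset ∧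
      let positions := ((PySem.List.enumerate sentence.toList).filter (fun p => p.2 ≠ ' ')).map Prod.fst
      offset ≤ (positions.length : Int) ∧
      (positions.getD (offset - 1).toNat 0) + 1 < (sentence.toList.length : Int))
instance (sentence : String) (offset : Int) : Decidable (Pre_adjust_offset sentence offset) := by
  unfold Pre_adjust_offset; infer_instance

def pvWitness_adjust_offset : String × Int := ("ab cd", 2)

def Spec_adjust_offset (sentence : String) (offset : Int) (out : Int) : Prop := out = adjust_offset_alt sentence offset
instance (sentence : String) (offset : Int) (out : Int) : Decidable (Spec_adjust_offset sentence offset out) := by unfold Spec_adjust_offset; infer_instance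

-- ===== CLAIM (what is proved, stated in full; the proofs are below) =====
def Claim_equal_adjust_offset : Prop := ∀ (sentence : String) (offset : Int), Dom_adjust_offset sentence offset → Pre_adjust_offset sentence offset → Spec_adjust_offset sentence offset (adjust_offset sentence offset)

-- ===== LEMMAS AND PROOFS =====

-- non-space character indices of `rest`, whose first character has index `i` in the full sentence
def posFrom (rest : List Char) (i : Int) : List Int :=
  match rest with
  | [] => []
  | c :: r => (if c ≠ ' ' then [i] else []) ++ posFrom r (i + 1)

theorem posFrom_enumerate (rest : List Char) (i : Int) :
    ((PySem.List.enumerate rest i).filter (fun p => p.2 ≠ ' ')).map Prod.fst = posFrom rest i := by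
  induction rest generalizing i with
  | nil => simp [PySem.List.enumerate_nil, posFrom]
  | cons c r ih =>
    have ih' : ∀ j : Int, ((PySem.List.enumerate r j).filter (fun p => !decide (p.2 = ' '))).map Prod.fst = posFrom r j := by
      intro j; simpa [ne_eq] using ih j
    by_cases h : c = ' ' <;>
      simp [PySem.List.enumerate_cons, posFrom, h, ih']

-- the value B computes from a looked-up position, with the offsets A's loop carries
def bVal (full : List Char) (o : Option Int) (adjusted : Int) (i : Int) : Int :=
  match o with
  | none => 0
  | some p =>
    match PySem.List.pyGet? full (p + 1) with
    | some ch => if ch = ' ' then adjusted + (p - i) + 1 + 1 else adjusted + (p - i) + 1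
    | none => 0

theorem bVal_shift (full : List Char) (o : Option Int) (adjusted i : Int) :
    bVal full o (adjusted + 1) (i + 1) = bVal full o adjusted i := by
  cases o with
  | none => rfl
  | some p =>
    simp only [bVal]
    cases PySem.List.pyGet? full (p + 1) with
    | none => rfl
    | some ch => by_cases hch : ch = ' ' <;> simp [hch] <;> ring

-- A's loop, when offset ≥ 1, computes the value B reads off the position list
theorem adjLoopA_char (full : List Char) :
    ∀ (rest : List Char) (i adjusted offset : Int), 1 ≤ offset →
    adjLoopA full rest i adjusted offset =
      bVal full (PySem.List.pyGet? (posFrom rest i) (offset - 1)) adjusted i := by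
  intro rest
  induction rest with
  | nil => intro i adjusted offset h; simp [adjLoopA, posFrom, PySem.List.pyGet?, bVal]
  | cons c r ih =>
    intro i adjusted offset h
    by_cases hc : c = ' '
    · have hne : ¬ offset = 0 := by omega
      simp only [adjLoopA, hc, posFrom]
      simp only [if_neg (by simp : ¬ (' ' ≠ ' ')), if_neg hne, List.nil_append]
      rw [ih (i + 1) (adjusted + 1) offset h, bVal_shift]
    · simp only [adjLoopA, posFrom, if_pos hc, List.singleton_append]
      by_cases h1 : offset = 1
      · subst h1
        simp only [show (1 : Int) + (-1) = 0 from by norm_num, if_pos rfl]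
        have hsome : PySem.List.pyGet? (i :: posFrom r (i + 1)) (1 - 1) = some i := by
          simp [PySem.List.pyGet?, PySem.List.pyIdx?]
        rw [hsome]
        simp only [bVal]
        cases PySem.List.pyGet? full (i + 1) with
        | none => rfl
        | some ch => by_cases hch : ch = ' ' <;> simp [hch] <;> ring
      · have h2 : 1 ≤ offset + (-1) := by omega
        have hneq : ¬ offset + (-1) = 0 := by omega
        simp only [if_neg hneq]
        rw [ih (i + 1) (adjusted + 1) (offset + (-1)) h2, bVal_shift]
        congr 1
        have hlen : (0:Int) ≤ offset - 1 := by omega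
        simp only [PySem.List.pyGet?, PySem.List.pyIdx?, List.length_cons]
        split_ifs with ha hb hb <;> try omega
        · have hto : (offset - 1).toNat = (offset + (-1) - 1).toNat + 1 := by omega
          simp [hto]
        · rfl

theorem adjLoopA_neg (full : List Char) :
    ∀ (rest : List Char) (i adjusted offset : Int), offset < 0 →
    adjLoopA full rest i adjusted offset = 0 := by
  intro rest
  induction rest with
  | nil => intro _ _ _ _; simp [adjLoopA]
  | cons c r ih =>
    intro i adjusted offset h
    have h1 : ¬ (if c ≠ ' ' then offset + (-1) else offset) = 0 := by
      split_ifs <;> omega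
    simp only [adjLoopA, if_neg h1]
    apply ih
    split_ifs <;> omega

theorem ports_agree_pos (sentence : String) (offset : Int) (h : 1 ≤ offset) :
    adjust_offset sentence offset = adjust_offset_alt sentence offset := by
  have hne : ¬ offset = 0 := by omega
  unfold adjust_offset adjust_offset_alt
  simp only [if_neg hne]
  rw [show PySem.List.enumerate sentence.toList = PySem.List.enumerate sentence.toList 0 from rfl,
    posFrom_enumerate]
  rw [adjLoopA_char sentence.toList sentence.toList 0 0 offset h]
  by_cases hrange : offset < 0 ∨ offset > ((posFrom sentence.toList 0).length : Int)
  · have hnone : PySem.List.pyGet? (posFrom sentence.toList 0) (offset - 1) = none := by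
      simp only [PySem.List.pyGet?, PySem.List.pyIdx?]
      split_ifs with ha hb hb <;> first | rfl | omega
    rw [hnone, if_pos hrange]
    rfl
  · rw [if_neg hrange]
    simp only [bVal]
    cases PySem.List.pyGet? (posFrom sentence.toList 0) (offset - 1) with
    | none => rfl
    | some p =>
      dsimp only
      cases PySem.List.pyGet? sentence.toList (p + 1) with
      | none => rfl
      | some ch => by_cases hch : ch = ' ' <;> simp [hch] <;> ring

-- ===== VERDICT (by name: the statement is the Claim_ definition above) =====
theorem adjust_offset_spec : Claim_equal_adjust_offset := by
  intro sentence offset _ _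
  unfold Spec_adjust_offset
  rcases lt_trichotomy offset 0 with h | h | h
  · have hne : ¬ offset = 0 := by omega
    unfold adjust_offset adjust_offset_alt
    simp only [if_neg hne]
    rw [adjLoopA_neg sentence.toList sentence.toList 0 0 offset h]
    rw [if_pos (Or.inl h)]
  · subst h; rfl
  · exact ports_agree_pos sentence offset (by omega)
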